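-- pv_equiv track=rewrite | github.com/ubrowz/jr-anchored | Python/jrc_convert_csv.py | detect_delimiter
-- ===== SOURCE A (Python) =====
-- def detect_delimiter(sample_lines):
--     """Try tab, then space, then comma. Return the one that gives most columns."""
--     best_delim = "\t"
--     best_count = 0
--     for delim in ["\t", " ", ","]:
--         # Count columns in first non-empty line
--         for line in sample_lines:
--             stripped = line.strip()
--             if stripped:
--                 parts = [p for p in stripped.split(delim) if p.strip()]
--                 if len(parts) > best_count:
--                     best_count = len(parts)
--                     best_delim = delim
--                 break
--     return best_delim
-- ===== SOURCE B (Python) =====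
-- def _count_fields(line, d):
--     """Count fields (segments between d's containing a non-whitespace char) by one char scan."""
--     cnt = 0
--     seen = False
--     for c in line:
--         if c == d:
--             if seen:
--                 cnt += 1
--             seen = False
--         elif not c.isspace():
--             seen = True
--     return cnt + (1 if seen else 0)
--
-- def detect_delimiter(sample_lines):
--     """Try tab, then space, then comma. Return the one that gives most columns."""
--     line = None
--     for l in sample_lines:
--         s = l.strip()
--         if s:
--             line = s
--             break
--     if line is None:
--         return "\t"
--     best, best_count = "\t", 0
--     for d in "\t ,":
--         n = _count_fields(line, d)
--         if n > best_count:
--             best, best_count = d, n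
--     return best
-- ===== Notes on version B (the rewrite author's own statement) =====
-- stated objective: alternative
-- what changed: B finds the first non-empty stripped line once, then counts each delimiter's columns by a single character scan (running cnt/seen state, no split and no intermediate part lists) instead of A's per-delimiter line scans with split+filter.
import Mathlib
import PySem

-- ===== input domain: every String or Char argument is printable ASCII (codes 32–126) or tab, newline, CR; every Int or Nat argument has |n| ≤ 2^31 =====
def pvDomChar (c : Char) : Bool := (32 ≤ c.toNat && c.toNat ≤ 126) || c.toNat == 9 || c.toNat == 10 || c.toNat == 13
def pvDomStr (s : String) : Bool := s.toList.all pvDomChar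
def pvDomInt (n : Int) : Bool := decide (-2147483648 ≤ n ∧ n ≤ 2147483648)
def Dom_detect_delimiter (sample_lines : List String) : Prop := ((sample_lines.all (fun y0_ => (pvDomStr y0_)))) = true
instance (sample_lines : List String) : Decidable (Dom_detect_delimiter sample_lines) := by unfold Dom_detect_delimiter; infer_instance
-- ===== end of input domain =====

-- B finds the first non-empty stripped line once and counts each delimiter's columns by a
-- single character scan (running cnt/seen state, no split, no part lists) — objective: alternative.

-- ===== PORT A =====
-- inner 'for line in sample_lines: … break' loop of A, for one delimiter
def ddInnerA (delim : String) (lines : List String) (best : String × Int) : String × Int :=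
  match lines with
  | [] => best
  | line :: rest =>
    let stripped := PySem.Str.strip line
    if stripped ≠ "" then
      -- delim is a nonempty literal, so split? is always some; the [] default is unreachable
      let parts := ((PySem.Str.split? stripped delim).getD []).filter (fun p => PySem.Str.strip p ≠ "")
      if ((parts.length : Int) > best.2) then (delim, (parts.length : Int)) else best
    else ddInnerA delim rest best

def detect_delimiter (sample_lines : List String) : String :=
  (["\t", " ", ","].foldl (fun best delim => ddInnerA delim sample_lines best) ("\t", (0 : Int))).1

-- ===== PORT B =====
-- body of Source B's 'for c in line' loop of _count_fields: state (cnt, seen)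
def cfStep (d : Char) (st : Int × Bool) (c : Char) : Int × Bool :=
  if c == d then (st.1 + (if st.2 then 1 else 0), false)
  else if ¬ PySem.Chars.isspace c then (st.1, true)
  else st

-- Source B's _count_fields(line, d): one pass over the characters
def count_fields (line : String) (d : Char) : Int :=
  let st := line.toList.foldl (cfStep d) (0, false)
  st.1 + (if st.2 then 1 else 0)

-- Source B's first loop: first non-empty stripped line, None if there is none
def ddFirstLine (lines : List String) : Option String :=
  match lines with
  | [] => none
  | l :: rest =>
    let s := PySem.Str.strip l
    if s ≠ "" then some s else ddFirstLine rest

def detect_delimiter_alt (sample_lines : List String) : String :=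
  match ddFirstLine sample_lines with
  | none => "\t"
  | some line =>
    -- 'for d in "\t ,"' iterates the three delimiter characters
    let best := ['\t', ' ', ','].foldl
      (fun (b : Char × Int) d =>
        let n := count_fields line d
        if n > b.2 then (d, n) else b) ('\t', (0 : Int))
    String.ofList [best.1]

-- ===== PRECONDITION & SPEC =====
def Spec_detect_delimiter (sample_lines : List String) (out : String) : Prop := out = detect_delimiter_alt sample_lines
instance (sample_lines : List String) (out : String) : Decidable (Spec_detect_delimiter sample_lines out) := by unfold Spec_detect_delimiter; infer_instance

-- ===== CLAIM (what is proved, stated in full; the proofs are below) =====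
def Claim_equal_detect_delimiter : Prop := ∀ (sample_lines : List String), Dom_detect_delimiter sample_lines → Spec_detect_delimiter sample_lines (detect_delimiter sample_lines)

-- ===== LEMMAS AND PROOFS =====

-- A's count of non-blank parts for one delimiter, on the String side
def ddCount (line delim : String) : Int :=
  (((PySem.Str.split? line delim).getD []).filter (fun p => PySem.Str.strip p ≠ "")).length

-- spec-side scan total: what the cnt/seen scan adds over a char list, given the current 'seen'
def scanTot (d : Char) (l : List Char) (seen : Bool) : Int :=
  match l with
  | [] => if seen then 1 else 0
  | c :: rest =>
    if c == d then (if seen then 1 else 0) + scanTot d rest false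
    else scanTot d rest (seen || !PySem.Chars.isspace c)

theorem ddInnerA_none (delim : String) (lines : List String) (best : String × Int)
    (h : ddFirstLine lines = none) : ddInnerA delim lines best = best := by
  induction lines with
  | nil => rfl
  | cons l rest ih =>
    unfold ddFirstLine at h
    unfold ddInnerA
    by_cases hs : PySem.Str.strip l ≠ ""
    · simp [hs] at h
    · simp only [hs, if_false]
      exact ih (by simpa [hs] using h)

theorem ddInnerA_some (delim : String) (lines : List String) (best : String × Int)
    (s : String) (h : ddFirstLine lines = some s) :
    ddInnerA delim lines best =
      (if ddCount s delim > best.2 then (delim, ddCount s delim) else best) := by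
  induction lines with
  | nil => simp [ddFirstLine] at h
  | cons l rest ih =>
    unfold ddFirstLine at h
    unfold ddInnerA
    by_cases hs : PySem.Str.strip l ≠ ""
    · have hsl : PySem.Str.strip l = s := by simpa [hs] using h
      rw [hsl] at hs
      simp [hsl, hs, ddCount]
    · simp only [hs, if_false]
      exact ih (by simpa [hs] using h)

-- a char list strips to [] exactly when all its chars are whitespace
theorem strip_eq_nil_iff (cs : List Char) :
    PySem.Chars.strip cs = [] ↔ cs.all PySem.Chars.isspace = true := by
  unfold PySem.Chars.strip PySem.Chars.rstrip PySem.Chars.lstrip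
  constructor
  · intro h
    have h' : ∀ x ∈ (List.dropWhile PySem.Chars.isspace cs).reverse, PySem.Chars.isspace x = true := by
      rw [← List.dropWhile_eq_nil_iff]
      simpa using h
    simp only [List.all_eq_true]
    intro x hx
    rcases (List.takeWhile_append_dropWhile (p := PySem.Chars.isspace) (l := cs)) ▸ hx with h0
    rw [← List.takeWhile_append_dropWhile (p := PySem.Chars.isspace) (l := cs)] at hx
    rcases List.mem_append.mp hx with h1 | h1
    · exact List.mem_takeWhile_imp h1
    · exact h' x (by simpa using h1)
  · intro h
    have : List.dropWhile PySem.Chars.isspace cs = [] := by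
      rw [List.dropWhile_eq_nil_iff]
      intro x hx; exact (List.all_eq_true.mp h) x hx
    simp [this]

-- the fuel-driven splitOn.go, counted by blank/non-blank parts, equals the scan total
theorem go_count (d : Char) :
    ∀ (fuel : Nat) (l cur : List Char) (acc : List (List Char)), l.length < fuel →
    ((PySem.Chars.splitOn.go [d] fuel l cur acc).countP (fun p => !p.all PySem.Chars.isspace) : Int)
      = (acc.countP (fun p => !p.all PySem.Chars.isspace) : Int)
        + scanTot d l (!cur.all PySem.Chars.isspace) := by
  intro fuel
  induction fuel with
  | zero => intro l cur acc h; omega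
  | succ fuel ih =>
    intro l cur acc h
    cases l with
    | nil =>
      rw [PySem.Chars.splitOn.go.eq_def]
      simp only [scanTot]
      by_cases hc : cur.all PySem.Chars.isspace <;>
        simp [hc, List.countP_reverse]
    | cons c rest =>
      rw [PySem.Chars.splitOn.go.eq_def]
      simp only [scanTot]
      by_cases hcd : c == d
      · have hpre : List.isPrefixOf [d] (c :: rest) = true := by
          simp [List.isPrefixOf]; exact (beq_iff_eq.mp hcd).symm
        simp only [hpre, if_true, List.length_cons, List.length_nil, List.drop_succ_cons, List.drop_zero, hcd]
        rw [ih rest [] (cur.reverse :: acc) (by simpa using Nat.lt_of_succ_lt_succ h)]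
        simp only [List.countP_cons, List.all_reverse, List.all_nil]
        by_cases hc : cur.all PySem.Chars.isspace <;> simp [hc] <;> ring
      · have hpre : List.isPrefixOf [d] (c :: rest) = false := by
          simp [List.isPrefixOf]; intro hdc; exact absurd (by simp [hdc] : (c == d) = true) (by simpa using hcd)
        simp only [hpre, Bool.false_eq_true, if_false, hcd]
        rw [ih rest (c :: cur) acc (by simpa using Nat.lt_of_succ_lt_succ h)]
        have : (!(c :: cur).all PySem.Chars.isspace)
             = ((!cur.all PySem.Chars.isspace) || !PySem.Chars.isspace c) := by
          simp [List.all_cons]; cases PySem.Chars.isspace c <;> cases cur.all PySem.Chars.isspace <;> simp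
        rw [this]

-- the foldl scan of Source B computes the scan total
theorem foldl_cfStep (d : Char) :
    ∀ (l : List Char) (cnt : Int) (seen : Bool),
    (l.foldl (cfStep d) (cnt, seen)).1 + (if (l.foldl (cfStep d) (cnt, seen)).2 then 1 else 0)
      = cnt + scanTot d l seen := by
  intro l
  induction l with
  | nil => intro cnt seen; simp [scanTot]
  | cons c rest ih =>
    intro cnt seen
    by_cases hcd : c == d
    · simp only [List.foldl_cons, cfStep, scanTot, hcd, if_true]
      rw [ih]; ring
    · by_cases hs : PySem.Chars.isspace c
      all_goals simp only [List.foldl_cons, cfStep, scanTot, hcd, hs, Bool.false_eq_true,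
        if_false, not_true, not_false_iff, if_true, Bool.not_true, Bool.not_false,
        Bool.or_false, Bool.or_true]
      · rw [ih]
      · rw [ih]

-- A's split-and-filter count equals B's character-scan count, for a one-char delimiter
theorem count_eq (line : String) (d : Char) (delim : String) (hd : delim.toList = [d]) :
    ddCount line delim = count_fields line d := by
  unfold ddCount count_fields
  have hsplit : PySem.Str.split? line delim
      = some ((PySem.Chars.splitOn line.toList [d]).map String.ofList) := by
    simp [PySem.Str.split?, PySem.Chars.split?, hd]
  rw [hsplit]
  simp only [Option.getD_some]
  have hfilter :
      (((PySem.Chars.splitOn line.toList [d]).map String.ofList).filter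
          (fun p => PySem.Str.strip p ≠ "")).length
        = (PySem.Chars.splitOn line.toList [d]).countP (fun p => !p.all PySem.Chars.isspace) := by
    rw [List.filter_map, List.length_map, ← List.countP_eq_length_filter]
    apply List.countP_congr
    intro p _
    have h1 : (PySem.Str.strip (String.ofList p)).toList = PySem.Chars.strip p := by
      rw [PySem.Str.toList_strip]; simp
    constructor
    · intro hp
      simp only [Function.comp, decide_eq_true_eq] at hp
      have : PySem.Chars.strip p ≠ [] := by
        rw [← h1]; intro hnil
        exact hp (by apply String.ext; simpa using hnil)
      cases hall : p.all PySem.Chars.isspace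
      · rfl
      · exact absurd ((strip_eq_nil_iff p).mpr hall) this
    · intro hp
      have hne : PySem.Chars.strip p ≠ [] := by
        intro hnil
        have := (strip_eq_nil_iff p).mp hnil
        simp [this] at hp
      simp only [Function.comp, decide_eq_true_eq]
      intro hs
      exact hne (by rw [← h1, hs]; rfl)
  rw [hfilter]
  have := go_count d (line.toList.length + 1) line.toList [] [] (by omega)
  unfold PySem.Chars.splitOn
  simp only [List.all_nil, Bool.not_true] at this
  rw [this]
  have := foldl_cfStep d line.toList 0 false
  simp only [List.countP_nil, Nat.cast_zero, zero_add] at this ⊢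
  omega

-- ===== VERDICT (by name: the statement is the Claim_ definition above) =====
theorem detect_delimiter_spec : Claim_equal_detect_delimiter := by
  intro sample_lines _
  unfold Spec_detect_delimiter detect_delimiter detect_delimiter_alt
  cases hf : ddFirstLine sample_lines with
  | none =>
    simp [List.foldl, ddInnerA_none _ _ _ hf]
  | some s =>
    simp only [List.foldl, ddInnerA_some _ _ _ _ hf,
      count_eq s '\t' "\t" (by decide), count_eq s ' ' " " (by decide),
      count_eq s ',' "," (by decide)]
    split_ifs <;> rfl
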